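-- pv_equiv track=rewrite | github.com/jdroob/cjq | cjq/trace/lowering.py | generate_subseq_lis
-- ===== SOURCE A (Python) =====
-- def generate_subseq_lis(dyn_op_seq, subseqs):
--     gen_lis = []
--     i = 0  # Start index
--     while i < len(dyn_op_seq):
--         matched = False
--         for subseq in subseqs:
--             subseq_len = len(subseq)
--             if tuple(dyn_op_seq[i:i + subseq_len]) == subseq:
--                 gen_lis.append(subseq)
--                 i += subseq_len  # Move the index forward by the length of the matched subsequence
--                 matched = True
--                 break
--         if not matched:
--             i += 1  # If no subsequence matches, move the index forward by 1
--     return gen_lis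
-- ===== SOURCE B (Python) =====
-- def generate_subseq_lis(dyn_op_seq, subseqs):
--     # Build a prefix trie of the subsequences once; each node keeps (under the
--     # key None) the smallest priority index of a subsequence ending there.
--     root = {}
--     for pri, s in enumerate(subseqs):
--         node = root
--         for x in s:
--             node = node.setdefault(x, {})
--         if None not in node:
--             node[None] = pri
--     gen_lis = []
--     i, n = 0, len(dyn_op_seq)
--     while i < n:
--         best = None  # (priority, end-position) of the best match starting at i
--         node, j = root, i
--         while True:
--             if None in node and (best is None or node[None] < best[0]):
--                 best = (node[None], j)
--             if j < n and dyn_op_seq[j] in node: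
--                 node = node[dyn_op_seq[j]]
--                 j += 1
--             else:
--                 break
--         if best is None:
--             i += 1
--         else:
--             gen_lis.append(subseqs[best[0]])
--             i = best[1]
--     return gen_lis
-- ===== Notes on version B (the rewrite author's own statement) =====
-- stated objective: faster
-- what changed: B builds a prefix trie of the subsequences tagged with each word's smallest priority index, and at each position walks the trie once along the input collecting the minimum-priority terminal, instead of A's inner scan that slices and compares every subsequence at every position.
import Mathlib
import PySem

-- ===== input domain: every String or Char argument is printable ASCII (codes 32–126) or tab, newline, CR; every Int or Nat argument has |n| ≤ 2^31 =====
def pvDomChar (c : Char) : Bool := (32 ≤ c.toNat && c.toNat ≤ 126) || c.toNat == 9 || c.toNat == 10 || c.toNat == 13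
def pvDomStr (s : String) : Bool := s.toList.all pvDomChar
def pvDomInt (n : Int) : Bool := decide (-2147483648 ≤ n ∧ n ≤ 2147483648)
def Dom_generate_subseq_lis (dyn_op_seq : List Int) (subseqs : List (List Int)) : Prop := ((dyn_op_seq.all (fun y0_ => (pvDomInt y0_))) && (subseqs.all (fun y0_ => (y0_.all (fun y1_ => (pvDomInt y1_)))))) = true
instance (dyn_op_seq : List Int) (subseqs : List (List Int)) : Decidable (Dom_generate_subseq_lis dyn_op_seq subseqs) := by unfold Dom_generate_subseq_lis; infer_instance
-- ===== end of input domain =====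

-- B replaces A's per-position scan over all subsequences by one prefix trie (tagged with each
-- word's smallest priority index) walked once along the input from each position.

-- ===== PORT A =====
-- the inner `for subseq in subseqs: ... break` — first subseq matching the slice at i
-- (`tuple(dyn_op_seq[i:i + subseq_len]) == subseq`: both sides are List Int under the encoding)
def findMatchA (dyn_op_seq : List Int) (subseqs : List (List Int)) (i : Nat) : Option (List Int) :=
  subseqs.find? (fun s =>
    PySem.List.slice dyn_op_seq (some (i : Int)) (some ((i : Int) + (s.length : Int))) == s)

-- the outer `while i < len(dyn_op_seq)` loop, state (i, gen_lis); fuel = len(dyn_op_seq):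
-- when no empty subsequence is matched every iteration advances i by at least 1, so the fuel
-- never runs out; when one is matched the Python loops forever and both ports truncate alike
def loopA (dyn_op_seq : List Int) (subseqs : List (List Int)) :
    Nat → Nat → List (List Int) → List (List Int)
  | 0, _, gen_lis => gen_lis
  | fuel + 1, i, gen_lis =>
    if i < dyn_op_seq.length then
      match findMatchA dyn_op_seq subseqs i with
      | some s => loopA dyn_op_seq subseqs fuel (i + s.length) (gen_lis ++ [s])
      | none => loopA dyn_op_seq subseqs fuel (i + 1) gen_lis
    else gen_lis

def generate_subseq_lis (dyn_op_seq : List Int) (subseqs : List (List Int)) : List (List Int) :=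
  loopA dyn_op_seq subseqs dyn_op_seq.length 0 []

-- ===== PORT B =====
-- the trie: a node holds the optional priority stored under Python's `None` key and the
-- children as an association list (dict elem -> child node); mutual pair, no nested inductive
mutual
inductive PTrie : Type where
  | node : Option Nat → PChildren → PTrie
inductive PChildren : Type where
  | nil : PChildren
  | cons : Int → PTrie → PChildren → PChildren
end

-- dict lookup `node[x]` / `x in node`
def childGet? : PChildren → Int → Option PTrie
  | .nil, _ => none
  | .cons y t r, x => if y == x then some t else childGet? r x

-- fresh chain of nodes created by `setdefault(x, {})` along a new path, priority at the end
def buildChain : List Int → Nat → PTrie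
  | [], pri => .node (some pri) .nil
  | x :: xs, pri => .node none (.cons x (buildChain xs pri) .nil)

-- the `for x in s: node = node.setdefault(x, {})` descent plus `if None not in node: node[None] = pri`
mutual
def insertTrie : PTrie → List Int → Nat → PTrie
  | .node term ch, [], pri => .node (match term with | none => some pri | some q => some q) ch
  | .node term ch, x :: xs, pri => .node term (childUpdate ch x xs pri)
termination_by t l _ => (2 * l.length, 0)
decreasing_by all_goals (first | apply Prod.Lex.right | apply Prod.Lex.left) <;> simp [PChildren.cons.sizeOf_spec] <;> omega
def childUpdate : PChildren → Int → List Int → Nat → PChildren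
  | .nil, x, xs, pri => .cons x (buildChain xs pri) .nil
  | .cons y t r, x, xs, pri =>
    if y == x then .cons y (insertTrie t xs pri) r
    else .cons y t (childUpdate r x xs pri)
termination_by ch _ xs _ => (2 * xs.length + 1, sizeOf ch)
decreasing_by all_goals (first | apply Prod.Lex.right | apply Prod.Lex.left) <;> simp [PChildren.cons.sizeOf_spec] <;> omega
end

-- `for pri, s in enumerate(subseqs): ...` building the trie once
def buildRoot : List (List Int) → Nat → PTrie → PTrie
  | [], _, r => r
  | s :: rest, k, r => buildRoot rest (k + 1) (insertTrie r s k)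

-- the inner `while True` walk from position i: follow the input through the trie, keeping the
-- (priority, end-position) of the smallest-priority terminal seen
def descend (seq : List Int) (n : Nat) : PTrie → Nat → Option (Nat × Nat) → Option (Nat × Nat)
  | .node term ch, j, best =>
    let best' : Option (Nat × Nat) :=
      match term, best with
      | some p, none => some (p, j)
      | some p, some b => if p < b.1 then some (p, j) else some b
      | none, b => b
    if h : j < n then
      match childGet? ch (seq.getD j 0) with
      | some t => descend seq n t (j + 1) best'
      | none => best'
    else best'
termination_by _ j _ => n - j
decreasing_by omega

-- the outer `while i < n` loop of B, same fuel discipline as A's port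
def walkB (seq : List Int) (subseqs : List (List Int)) (root : PTrie) :
    Nat → Nat → List (List Int) → List (List Int)
  | 0, _, gen => gen
  | fuel + 1, i, gen =>
    if i < seq.length then
      match descend seq seq.length root i none with
      | none => walkB seq subseqs root fuel (i + 1) gen
      | some b => walkB seq subseqs root fuel b.2 (gen ++ [subseqs.getD b.1 []])
    else gen

def generate_subseq_lis_alt (dyn_op_seq : List Int) (subseqs : List (List Int)) : List (List Int) :=
  walkB dyn_op_seq subseqs (buildRoot subseqs 0 (.node none .nil)) dyn_op_seq.length 0 []

-- ===== PRECONDITION & SPEC =====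
def Spec_generate_subseq_lis (dyn_op_seq : List Int) (subseqs : List (List Int)) (out : List (List Int)) : Prop := out = generate_subseq_lis_alt dyn_op_seq subseqs
instance (dyn_op_seq : List Int) (subseqs : List (List Int)) (out : List (List Int)) : Decidable (Spec_generate_subseq_lis dyn_op_seq subseqs out) := by unfold Spec_generate_subseq_lis; infer_instance

-- ===== CLAIM (what is proved, stated in full; the proofs are below) =====
def Claim_equal_generate_subseq_lis : Prop := ∀ (dyn_op_seq : List Int) (subseqs : List (List Int)), Dom_generate_subseq_lis dyn_op_seq subseqs → Spec_generate_subseq_lis dyn_op_seq subseqs (generate_subseq_lis dyn_op_seq subseqs)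

-- ===== LEMMAS AND PROOFS =====

-- termAt t q: the priority stored at the end of path q in t, if the path exists
def termAt : PTrie → List Int → Option Nat
  | .node term _, [] => term
  | .node _ ch, x :: xs =>
    match childGet? ch x with
    | some t => termAt t xs
    | none => none

theorem childGet?_childUpdate_self : ∀ (ch : PChildren) (x : Int) (xs : List Int) (pri : Nat),
    childGet? (childUpdate ch x xs pri) x
      = some (match childGet? ch x with
              | some t => insertTrie t xs pri
              | none => buildChain xs pri)
  | .nil, x, xs, pri => by simp [childUpdate, childGet?]
  | .cons y t r, x, xs, pri => by
    by_cases h : y = x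
    · subst h; simp [childUpdate, childGet?]
    · simp [childUpdate, childGet?, h, childGet?_childUpdate_self r x xs pri]

theorem childGet?_childUpdate_ne : ∀ (ch : PChildren) (x y : Int) (xs : List Int) (pri : Nat),
    y ≠ x → childGet? (childUpdate ch x xs pri) y = childGet? ch y
  | .nil, x, y, xs, pri, h => by simp [childUpdate, childGet?, Ne.symm h]
  | .cons z t r, x, y, xs, pri, h => by
    by_cases hz : z = x
    · subst hz; simp [childUpdate, childGet?, Ne.symm h]
    · simp [childUpdate, childGet?, hz, childGet?_childUpdate_ne r x y xs pri h]

theorem termAt_buildChain (xs : List Int) (pri : Nat) (q : List Int) :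
    termAt (buildChain xs pri) q = if q = xs then some pri else none := by
  induction xs generalizing q with
  | nil => cases q <;> simp [buildChain, termAt, childGet?]
  | cons x xs ih =>
    cases q with
    | nil => simp [buildChain, termAt]
    | cons y ys =>
      by_cases h : x = y
      · subst h; simp [buildChain, termAt, childGet?, ih]
      · simp [buildChain, termAt, childGet?, h, Ne.symm h]

theorem termAt_insertTrie : ∀ (s : List Int) (pri : Nat) (t : PTrie) (q : List Int),
    termAt (insertTrie t s pri) q
      = if q = s then some ((termAt t s).getD pri) else termAt t q
  | [], pri, .node term ch, q => by
    cases q with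
    | nil => cases term <;> simp [insertTrie, termAt]
    | cons y ys => cases term <;> simp [insertTrie, termAt]
  | x :: xs, pri, .node term ch, q => by
    cases q with
    | nil => simp [insertTrie, termAt]
    | cons y ys =>
      by_cases hy : y = x
      · subst hy
        rw [show insertTrie (.node term ch) (y :: xs) pri
              = .node term (childUpdate ch y xs pri) from by simp [insertTrie]]
        simp only [termAt, childGet?_childUpdate_self]
        cases hc : childGet? ch y with
        | some t' =>
          simp only [termAt_insertTrie xs pri t' ys, termAt, hc, List.cons.injEq, true_and]
        | none =>
          simp only [termAt_buildChain, termAt, hc, List.cons.injEq, true_and]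
          split <;> rfl
      · rw [show insertTrie (.node term ch) (x :: xs) pri
              = .node term (childUpdate ch x xs pri) from by simp [insertTrie]]
        simp [termAt, childGet?_childUpdate_ne ch x y xs pri hy, hy]

theorem termAt_buildRoot (q : List Int) :
    ∀ (l : List (List Int)) (k : Nat) (r : PTrie),
      termAt (buildRoot l k r) q
        = match termAt r q with
          | some p => some p
          | none => (l.findIdx? (fun s => s == q)).map (· + k) := by
  intro l
  induction l with
  | nil => intro k r; cases hc : termAt r q <;> simp [buildRoot, hc]
  | cons s rest ih =>
    intro k r
    rw [show buildRoot (s :: rest) k r = buildRoot rest (k + 1) (insertTrie r s k) from rfl,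
      ih, termAt_insertTrie]
    by_cases hq : q = s
    · subst hq
      cases hc : termAt r q <;> simp [hc, List.findIdx?_cons]
    · simp only [hq, if_false]
      cases hc : termAt r q with
      | some p => simp
      | none =>
        have : (s == q) = false := by simp [Ne.symm hq]
        simp [List.findIdx?_cons, this, Option.map_map]
        cases rest.findIdx? (fun u => u == q) <;> simp [Function.comp] <;> omega

-- the candidate list: the (priority, end) pairs descend's walk from (t, j) encounters, in order
def candList (seq : List Int) (n : Nat) : PTrie → Nat → List (Nat × Nat)
  | .node term ch, j =>
    (match term with | some p => [(p, j)] | none => []) ++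
    (if h : j < n then
      match childGet? ch (seq.getD j 0) with
      | some t => candList seq n t (j + 1)
      | none => []
    else [])
termination_by t j => n - j
decreasing_by omega

-- the accumulator step of descend
def bestStep (b : Option (Nat × Nat)) (c : Nat × Nat) : Option (Nat × Nat) :=
  match b with
  | none => some c
  | some bb => if c.1 < bb.1 then some c else some bb

theorem descend_eq_foldl (seq : List Int) (n : Nat) :
    ∀ (t : PTrie) (j : Nat) (best : Option (Nat × Nat)),
      descend seq n t j best = (candList seq n t j).foldl bestStep best
  | .node term ch, j, best => by
    rw [descend.eq_def, candList.eq_def]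
    have hstep : ∀ (b : Option (Nat × Nat)),
        (match term, b with
          | some p, none => some (p, j)
          | some p, some bb => if p < bb.1 then some (p, j) else some bb
          | none, bb => bb)
          = List.foldl bestStep b (match term with | some p => [(p, j)] | none => []) := by
      intro b; cases term <;> cases b <;> rfl
    by_cases h : j < n
    · simp only [h, dif_pos, List.foldl_append, ← hstep]
      cases hc : childGet? ch (seq.getD j 0) with
      | some t' => exact descend_eq_foldl seq n t' (j + 1) _
      | none => rfl
    · simp only [h, dif_neg, not_false_iff, List.foldl_append, ← hstep]
      rfl
termination_by t j _ => n - j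
decreasing_by omega

theorem candList_mem (seq : List Int) (n : Nat) (hn : n = seq.length) (p e : Nat) :
    ∀ (t : PTrie) (j : Nat), j ≤ n →
      ((p, e) ∈ candList seq n t j ↔
        ∃ d, d ≤ n - j ∧ e = j + d ∧ termAt t ((seq.drop j).take d) = some p)
  | .node term ch, j => by
    intro hj
    rw [candList.eq_def]
    by_cases h : j < n
    · have hjl : j < seq.length := hn ▸ h
      have hdrop : seq.drop j = seq[j] :: seq.drop (j + 1) := List.drop_eq_getElem_cons hjl
      have hget : seq.getD j 0 = seq[j] := by
        rw [List.getD_eq_getElem?_getD, List.getElem?_eq_getElem hjl]; rfl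
      cases hc : childGet? ch (seq.getD j 0) with
      | some t' =>
        have ih := candList_mem seq n hn p e t' (j + 1) (by omega)
        simp only [h, dif_pos, hc, List.mem_append, ih]
        constructor
        · rintro (hhead | ⟨d, hd, he, ht⟩)
          · cases term with
            | none => simp at hhead
            | some p' =>
              simp only [List.mem_singleton, Prod.mk.injEq] at hhead
              exact ⟨0, by omega, by omega, by simp [termAt, ← hhead.1]⟩
          · refine ⟨d + 1, by omega, by omega, ?_⟩
            rw [hdrop, List.take_succ_cons, termAt]
            rw [hget] at hc
            simp [hc, ht]
        · rintro ⟨d, hd, he, ht⟩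
          cases d with
          | zero =>
            left
            simp only [List.take_zero] at ht
            cases term with
            | none => simp [termAt] at ht
            | some p' =>
              simp only [termAt] at ht
              simp [he, Option.some.inj ht.symm]
          | succ d =>
            right
            rw [hdrop, List.take_succ_cons, termAt] at ht
            rw [hget] at hc
            rw [hc] at ht
            exact ⟨d, by omega, by omega, ht⟩
      | none =>
        simp only [h, dif_pos, hc, List.append_nil]
        constructor
        · intro hhead
          cases term with
          | none => simp at hhead
          | some p' =>
            simp only [List.mem_singleton, Prod.mk.injEq] at hhead
            exact ⟨0, by omega, by omega, by simp [termAt, ← hhead.1]⟩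
        · rintro ⟨d, hd, he, ht⟩
          cases d with
          | zero =>
            simp only [List.take_zero] at ht
            cases term with
            | none => simp [termAt] at ht
            | some p' =>
              simp only [termAt] at ht
              simp [he, Option.some.inj ht.symm]
          | succ d =>
            rw [hdrop, List.take_succ_cons, termAt] at ht
            rw [hget] at hc
            rw [hc] at ht
            simp at ht
    · have hjn : j = n := by omega
      simp only [h, dif_neg, not_false_iff, List.append_nil]
      constructor
      · intro hhead
        cases term with
        | none => simp at hhead
        | some p' =>
          simp only [List.mem_singleton, Prod.mk.injEq] at hhead
          exact ⟨0, by omega, by omega, by simp [termAt, ← hhead.1]⟩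
      · rintro ⟨d, hd, he, ht⟩
        have hd0 : d = 0 := by omega
        subst hd0
        simp only [List.take_zero] at ht
        cases term with
        | none => simp [termAt] at ht
        | some p' =>
          simp only [termAt] at ht
          simp [he, Option.some.inj ht.symm]
termination_by t j => n - j
decreasing_by omega

theorem foldl_bestStep_keep (x : Nat × Nat) :
    ∀ (l : List (Nat × Nat)), (∀ y ∈ l, x.1 ≤ y.1) → l.foldl bestStep (some x) = some x := by
  intro l
  induction l with
  | nil => intro _; rfl
  | cons y t ih =>
    intro hle
    have : bestStep (some x) y = some x := by
      simp only [bestStep]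
      rw [if_neg (by have := hle y (List.mem_cons_self); omega)]
    rw [List.foldl_cons, this]
    exact ih (fun z hz => hle z (List.mem_cons_of_mem y hz))

theorem foldl_bestStep_min_aux (x : Nat × Nat) :
    ∀ (l : List (Nat × Nat)) (b : Option (Nat × Nat)), x ∈ l →
      (∀ y ∈ l, y ≠ x → x.1 < y.1) →
      (b = none ∨ ∃ bb, b = some bb ∧ x.1 < bb.1) →
      l.foldl bestStep b = some x := by
  intro l
  induction l with
  | nil => intro b hx; simp at hx
  | cons y t ih =>
    intro b hx hmin hb
    by_cases hyx : y = x
    · subst hyx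
      have hstep : bestStep b y = some y := by
        rcases hb with hb | ⟨bb, hb, hlt⟩
        · rw [hb]; rfl
        · rw [hb]; simp only [bestStep]; rw [if_pos hlt]
      rw [List.foldl_cons, hstep]
      exact foldl_bestStep_keep y t (fun z hz => by
        by_cases hzx : z = y
        · simp [hzx]
        · exact Nat.le_of_lt (hmin z (List.mem_cons_of_mem y hz) hzx))
    · have hxt : x ∈ t := by
        rcases List.mem_cons.mp hx with h | h
        · exact absurd h.symm hyx
        · exact h
      have hxy : x.1 < y.1 := hmin y List.mem_cons_self hyx
      refine ih (bestStep b y) hxt (fun z hz hzx => hmin z (List.mem_cons_of_mem y hz) hzx) ?_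
      rcases hb with hb | ⟨bb, hb, hlt⟩
      · right; exact ⟨y, by rw [hb]; rfl, hxy⟩
      · rw [hb]; simp only [bestStep]
        split
        · right; exact ⟨y, rfl, hxy⟩
        · right; exact ⟨bb, rfl, hlt⟩

theorem foldl_bestStep_min (x : Nat × Nat) :
    ∀ (l : List (Nat × Nat)), x ∈ l → (∀ y ∈ l, y ≠ x → x.1 < y.1) →
      l.foldl bestStep none = some x := by
  intro l hx hmin
  exact foldl_bestStep_min_aux x l none hx hmin (Or.inl rfl)

theorem termAt_root (subseqs : List (List Int)) (q : List Int) :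
    termAt (buildRoot subseqs 0 (.node none .nil)) q
      = subseqs.findIdx? (fun u => u == q) := by
  rw [termAt_buildRoot]
  have h0 : termAt (.node none .nil) q = none := by cases q <;> simp [termAt, childGet?]
  rw [h0]
  cases subseqs.findIdx? (fun u => u == q) <;> simp

theorem take_len_take (l : List Int) (d : Nat) : l.take ((l.take d).length) = l.take d := by
  rw [List.length_take]
  rcases Nat.le_total d l.length with h | h
  · rw [Nat.min_eq_left h]
  · rw [Nat.min_eq_right h, List.take_of_length_le h, List.take_of_length_le (le_refl _)]

theorem descend_spec (seq : List Int) (subseqs : List (List Int)) (i : Nat)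
    (hi : i < seq.length) :
    descend seq seq.length (buildRoot subseqs 0 (.node none .nil)) i none
      = match findMatchA seq subseqs i with
        | none => none
        | some s => some ((subseqs.findIdx? (fun u => u == s)).getD 0, i + s.length) := by
  have hpred : ∀ s : List Int,
      (PySem.List.slice seq (some (i : Int)) (some ((i : Int) + (s.length : Int))) == s)
        = ((seq.drop i).take s.length == s) := fun s => by
    rw [PySem.List.slice_natCast_add]
  rw [descend_eq_foldl]
  cases hA : findMatchA seq subseqs i with
  | none =>
    have hnone : ∀ x ∈ subseqs, ¬(((seq.drop i).take x.length == x) = true) := by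
      intro x hx
      have h := List.find?_eq_none.mp hA x hx
      rwa [hpred] at h
    have hempty : candList seq seq.length (buildRoot subseqs 0 (.node none .nil)) i = [] := by
      rw [List.eq_nil_iff_forall_not_mem]
      rintro ⟨p, e⟩ hmem
      rw [candList_mem seq seq.length rfl p e _ i (Nat.le_of_lt hi)] at hmem
      obtain ⟨d, hd, he, ht⟩ := hmem
      rw [termAt_root] at ht
      obtain ⟨hplen, hpq, hpmin⟩ := (List.findIdx?_eq_some_iff_getElem).mp ht
      have hq : subseqs[p] = (seq.drop i).take d := by simpa using hpq
      exact (hnone subseqs[p] (List.getElem_mem _)) (by rw [hq, take_len_take]; simp)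
    rw [hempty]
    rfl
  | some s =>
    obtain ⟨hpreds, k0, hk0len, hk0val, hk0min⟩ := List.find?_eq_some_iff_getElem.mp hA
    rw [hpred] at hpreds
    have hs_take : (seq.drop i).take s.length = s := by simpa using hpreds
    have hfi : subseqs.findIdx? (fun u => u == s) = some k0 := by
      rw [List.findIdx?_eq_some_iff_getElem]
      refine ⟨hk0len, by simp [hk0val], ?_⟩
      intro j hj
      have hnp := hk0min j hj
      rw [hpred] at hnp
      simp only [Bool.not_eq_true', Bool.not_true, Bool.not_eq_false'] at hnp ⊢
      intro hcon
      have hjs : subseqs[j] = s := by simpa using hcon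
      rw [hjs, hs_take] at hnp
      simp at hnp
    have hslen : s.length ≤ seq.length - i := by
      have hlen := congrArg List.length hs_take
      rw [List.length_take, List.length_drop] at hlen
      omega
    have hxmem : (k0, i + s.length)
        ∈ candList seq seq.length (buildRoot subseqs 0 (.node none .nil)) i := by
      rw [candList_mem seq seq.length rfl _ _ _ i (Nat.le_of_lt hi)]
      exact ⟨s.length, hslen, rfl, by rw [termAt_root, hs_take, hfi]⟩
    have hminimal : ∀ y ∈ candList seq seq.length (buildRoot subseqs 0 (.node none .nil)) i,
        y ≠ (k0, i + s.length) → (k0, i + s.length).1 < y.1 := by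
      rintro ⟨p, e⟩ hmem hne
      rw [candList_mem seq seq.length rfl _ _ _ i (Nat.le_of_lt hi)] at hmem
      obtain ⟨d, hd, he, ht⟩ := hmem
      rw [termAt_root] at ht
      obtain ⟨hplen, hpq, hpmin⟩ := (List.findIdx?_eq_some_iff_getElem).mp ht
      have hq : subseqs[p] = (seq.drop i).take d := by simpa using hpq
      have hpredp : ((seq.drop i).take subseqs[p].length == subseqs[p]) = true := by
        rw [hq, take_len_take]; simp
      have hk0le : k0 ≤ p := by
        by_contra hlt
        push_neg at hlt
        have hmm := hk0min p hlt
        rw [hpred] at hmm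
        rw [hpredp] at hmm
        simp at hmm
      rcases Nat.eq_or_lt_of_le hk0le with heq | hlt
      · exfalso
        apply hne
        subst heq
        have hds : d = s.length := by
          have h1 : s = (seq.drop i).take d := by rw [← hk0val, hq]
          have h2 := congrArg List.length h1
          rw [List.length_take, List.length_drop] at h2
          omega
        simp [he, hds]
      · exact hlt
    rw [foldl_bestStep_min (k0, i + s.length) _ hxmem hminimal]
    show some (k0, i + s.length)
      = some ((subseqs.findIdx? (fun u => u == s)).getD 0, i + s.length)
    rw [hfi]
    rfl

theorem findIdx?_getD_eq (subseqs : List (List Int)) (s : List Int) (k : Nat)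
    (h : subseqs.findIdx? (fun u => u == s) = some k) : subseqs.getD k [] = s := by
  obtain ⟨hlen, hval, _⟩ := (List.findIdx?_eq_some_iff_getElem).mp h
  have : subseqs[k] = s := by simpa using hval
  rw [List.getD_eq_getElem?_getD, List.getElem?_eq_getElem hlen]
  simpa using this

theorem findMatchA_findIdx? (seq : List Int) (subseqs : List (List Int)) (i : Nat)
    (s : List Int) (hA : findMatchA seq subseqs i = some s) :
    ∃ k, subseqs.findIdx? (fun u => u == s) = some k ∧ subseqs.getD k [] = s := by
  obtain ⟨hpreds, k0, hk0len, hk0val, hk0min⟩ := List.find?_eq_some_iff_getElem.mp hA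
  cases hfi : subseqs.findIdx? (fun u => u == s) with
  | none =>
    exfalso
    have := List.findIdx?_eq_none_iff.mp hfi s (hk0val ▸ List.getElem_mem hk0len)
    simp at this
  | some k => exact ⟨k, rfl, findIdx?_getD_eq subseqs s k hfi⟩

theorem loopA_eq_walkB (seq : List Int) (subseqs : List (List Int)) :
    ∀ (fuel i : Nat) (gen : List (List Int)),
      loopA seq subseqs fuel i gen
        = walkB seq subseqs (buildRoot subseqs 0 (.node none .nil)) fuel i gen := by
  intro fuel
  induction fuel with
  | zero => intro i gen; rfl
  | succ f ih =>
    intro i gen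
    rw [loopA, walkB]
    by_cases hi : i < seq.length
    · simp only [hi, if_pos]
      rw [descend_spec seq subseqs i hi]
      cases hA : findMatchA seq subseqs i with
      | none => exact ih _ _
      | some s =>
        obtain ⟨k, hfi, hgd⟩ := findMatchA_findIdx? seq subseqs i s hA
        simp only [hfi, Option.getD_some, hgd]
        exact ih _ _
    · simp [hi]

-- ===== VERDICT (by name: the statement is the Claim_ definition above) =====
theorem generate_subseq_lis_spec : Claim_equal_generate_subseq_lis := by
  intro dyn subseqs _
  unfold Spec_generate_subseq_lis generate_subseq_lis generate_subseq_lis_alt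
  exact loopA_eq_walkB dyn subseqs _ 0 []
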